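-- pv_equiv track=rewrite | github.com/pypi-data/pypi-mirror-396 | packages/vocabulous/vocabulous-0.1.3-py3-none-any.whl/vocabulous/vocabulous.py | _accumulate_dict_chunk
-- ===== SOURCE A (Python) =====
-- def _accumulate_dict_chunk(payload):
--     """Worker chunk for dictionary accumulation.
--
--     payload: (langs_list, words_list)
--     Returns: (partial_word_lang_freq, partial_languages)
--     """
--     langs_list, words_list = payload
--     partial_freq = {}
--     partial_langs = set()
--     for lang, words in zip(langs_list, words_list):
--         partial_langs.add(lang)
--         for word in words:
--             if word not in partial_freq:
--                 partial_freq[word] = {}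
--             if lang not in partial_freq[word]:
--                 partial_freq[word][lang] = 0
--             partial_freq[word][lang] += 1
--     return partial_freq, partial_langs
-- ===== SOURCE B (Python) =====
-- def _accumulate_dict_chunk(payload):
--     """Flat (word, lang) -> count table built in one pass, then reshaped into the nested dict."""
--     langs_list, words_list = payload
--     pairs = list(zip(langs_list, words_list))
--     partial_langs = {lang for lang, _ in pairs}
--     flat = {}
--     for lang, words in pairs:
--         for word in words:
--             key = (word, lang)
--             flat[key] = flat.get(key, 0) + 1
--     nested = {}
--     for (word, lang), count in flat.items():
--         inner = nested.get(word, {})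
--         inner[lang] = count
--         nested[word] = inner
--     return nested, partial_langs
-- ===== Notes on version B (the rewrite author's own statement) =====
-- stated objective: alternative
-- what changed: B counts into a flat dict keyed by (word, lang) tuples in one pass and then reshapes that table into the nested word->lang->count dict in a second pass, collecting the languages with a set comprehension, instead of A's direct counting into the nested structure with membership guards.
import Mathlib
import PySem

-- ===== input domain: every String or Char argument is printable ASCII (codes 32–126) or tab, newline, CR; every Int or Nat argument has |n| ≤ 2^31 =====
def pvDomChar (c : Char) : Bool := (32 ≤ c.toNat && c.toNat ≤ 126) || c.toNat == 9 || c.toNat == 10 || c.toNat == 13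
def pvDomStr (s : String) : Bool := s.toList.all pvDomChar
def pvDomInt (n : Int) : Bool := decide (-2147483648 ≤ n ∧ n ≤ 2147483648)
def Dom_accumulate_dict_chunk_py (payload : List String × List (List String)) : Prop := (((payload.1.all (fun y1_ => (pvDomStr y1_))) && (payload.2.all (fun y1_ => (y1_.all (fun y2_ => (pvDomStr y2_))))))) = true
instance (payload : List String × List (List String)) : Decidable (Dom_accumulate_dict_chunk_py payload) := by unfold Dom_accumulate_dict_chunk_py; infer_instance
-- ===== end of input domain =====

-- B counts into a flat (word, lang) → count dict in one pass and reshapes it into the nested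
-- dict in a second pass (a different data organisation, same cost); A counts directly into the
-- nested dict.  Equivalence is exact on all inputs.

-- ===== PORT A =====
-- the body of A's inner loop over `words` (the three nested-dict statements, in order)
def pvStepA (d : PySem.Dict String (PySem.Dict String Int)) (lang word : String) :
    PySem.Dict String (PySem.Dict String Int) :=
  let d1 := if d.contains word then d else d.insert word PySem.Dict.empty
  let d2 := if (d1.getD word PySem.Dict.empty).contains lang then d1
            else d1.insert word ((d1.getD word PySem.Dict.empty).insert lang 0)
  d2.insert word ((d2.getD word PySem.Dict.empty).insert lang
    ((d2.getD word PySem.Dict.empty).getD lang 0 + 1))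

def accumulate_dict_chunk_py (payload : List String × List (List String)) :
    (List (String × List (String × Int))) × List String :=
  let langs_list := payload.1
  let words_list := payload.2
  let st := (langs_list.zip words_list).foldl
      (fun st p => (p.2.foldl (fun d w => pvStepA d p.1 w) st.1, PySem.Set.add st.2 p.1))
      (PySem.Dict.empty, PySem.Set.empty)
  (st.1.items.map (fun q => (q.1, q.2.items)), st.2)

-- ===== PORT B =====
-- the body of B's reshape loop: inner = nested.get(word, {}); inner[lang] = count; nested[word] = inner
def pvStepB (n : PySem.Dict String (PySem.Dict String Int)) (p : (String × String) × Int) :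
    PySem.Dict String (PySem.Dict String Int) :=
  n.insert p.1.1 ((n.getD p.1.1 PySem.Dict.empty).insert p.1.2 p.2)

def accumulate_dict_chunk_py_alt (payload : List String × List (List String)) :
    (List (String × List (String × Int))) × List String :=
  let pairs := payload.1.zip payload.2
  let partial_langs := PySem.Set.ofList (pairs.map (·.1))
  let flat := pairs.foldl
      (fun f p => p.2.foldl (fun f w => f.insert (w, p.1) (f.getD (w, p.1) 0 + 1)) f)
      PySem.Dict.empty
  let nested := flat.items.foldl pvStepB PySem.Dict.empty
  (nested.items.map (fun q => (q.1, q.2.items)), partial_langs)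

-- ===== PRECONDITION & SPEC =====
def Spec_accumulate_dict_chunk_py (payload : List String × List (List String)) (out : (List (String × List (String × Int))) × List String) : Prop := out = accumulate_dict_chunk_py_alt payload
instance (payload : List String × List (List String)) (out : (List (String × List (String × Int))) × List String) : Decidable (Spec_accumulate_dict_chunk_py payload out) := by unfold Spec_accumulate_dict_chunk_py; infer_instance

-- ===== CLAIM (what is proved, stated in full; the proofs are below) =====
def Claim_equal_accumulate_dict_chunk_py : Prop := ∀ (payload : List String × List (List String)), Dom_accumulate_dict_chunk_py payload → Spec_accumulate_dict_chunk_py payload (accumulate_dict_chunk_py payload)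

-- ===== LEMMAS AND PROOFS =====

-- if some inner dict at w contains a key, then w is a key of the outer dict
theorem pv_contains_of_inner (d : PySem.Dict String (PySem.Dict String Int)) (w lang : String)
    (h : (d.getD w PySem.Dict.empty).contains lang = true) : d.contains w = true := by
  by_cases hc : d.contains w = true
  · exact hc
  · rw [PySem.Dict.getD_of_not_contains d PySem.Dict.empty (by simpa using hc)] at h
    simpa using h

-- two inserts at distinct keys commute when the first key is already present
theorem pv_insert_comm {κ ν : Type} [BEq κ] [LawfulBEq κ] (d : PySem.Dict κ ν)
    (k k' : κ) (v v' : ν) (hne : k ≠ k') (hk : d.contains k = true) :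
    (d.insert k v).insert k' v' = (d.insert k' v').insert k v := by
  apply PySem.Dict.ext
  by_cases hk' : d.contains k' = true
  · rw [PySem.Dict.items_insert_of_contains (d.insert k v) v'
        (by simp [PySem.Dict.contains_insert, hk']),
      PySem.Dict.items_insert_of_contains d v hk,
      PySem.Dict.items_insert_of_contains (d.insert k' v') v
        (by simp [PySem.Dict.contains_insert, hk]),
      PySem.Dict.items_insert_of_contains d v' hk']
    simp only [List.map_map]
    apply List.map_congr_left
    intro p _
    by_cases h1 : p.1 = k <;> by_cases h2 : p.1 = k' <;>
      simp_all [Function.comp, (by simpa using hne : (k == k') = false),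
        (by simpa using hne.symm : (k' == k) = false)]
  · rw [PySem.Dict.items_insert_of_not_contains (d.insert k v) v'
        (by simp [PySem.Dict.contains_insert, (by simpa using hne.symm : (k' == k) = false),
          (by simpa using hk' : d.contains k' = false)]),
      PySem.Dict.items_insert_of_contains d v hk,
      PySem.Dict.items_insert_of_contains (d.insert k' v') v
        (by simp [PySem.Dict.contains_insert, hk]),
      PySem.Dict.items_insert_of_not_contains d v' (by simpa using hk')]
    simp [(by simpa using hne.symm : (k' == k) = false)]

-- whether the reshape fold's inner dict at w contains lang, in terms of the pending pairs
theorem pv_inner_contains (l : List ((String × String) × Int))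
    (n0 : PySem.Dict String (PySem.Dict String Int)) (w lang : String) :
    ((l.foldl pvStepB n0).getD w PySem.Dict.empty).contains lang
      = ((n0.getD w PySem.Dict.empty).contains lang || decide ((w, lang) ∈ l.map (·.1))) := by
  induction l generalizing n0 with
  | nil => simp
  | cons p rest ih =>
    rcases p with ⟨⟨w', l'⟩, c⟩
    rw [List.foldl_cons, ih]
    by_cases hw : w = w'
    · subst hw
      simp only [pvStepB]
      rw [PySem.Dict.getD_insert_self, PySem.Dict.contains_insert]
      by_cases hl : lang = l'
      · simp [hl]
      · have hiff : ((w, lang) ∈ ((w, l') :: rest.map (·.1))) ↔ ((w, lang) ∈ rest.map (·.1)) := by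
          simp [Prod.mk.injEq, hl]
        rw [List.map_cons, decide_eq_decide.mpr hiff]
        · simp [(by simpa using hl : (lang == l') = false)]
        · infer_instance
    · simp only [pvStepB]
      rw [PySem.Dict.getD_insert_of_ne n0 _ _ hw]
      have hiff : ((w, lang) ∈ ((w', l') :: rest.map (·.1))) ↔ ((w, lang) ∈ rest.map (·.1)) := by
        simp [Prod.mk.injEq, hw]
      rw [List.map_cons, decide_eq_decide.mpr hiff]

-- if (w,lang) never occurs in l, the inner value at (w,lang) is untouched by the fold
theorem pv_inner_get_preserved (l : List ((String × String) × Int)) (w lang : String)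
    (h : (w, lang) ∉ l.map (·.1)) (n0 : PySem.Dict String (PySem.Dict String Int)) :
    ((l.foldl pvStepB n0).getD w PySem.Dict.empty).get? lang
      = ((n0.getD w PySem.Dict.empty).get? lang) := by
  induction l generalizing n0 with
  | nil => rfl
  | cons p rest ih =>
    rcases p with ⟨⟨w', l'⟩, c⟩
    simp only [List.map_cons, List.mem_cons, not_or] at h
    rw [List.foldl_cons, ih h.2]
    by_cases hw : w = w'
    · subst hw
      have hl : lang ≠ l' := fun hl => h.1 (by rw [hl])
      simp only [pvStepB]
      rw [PySem.Dict.getD_insert_self, PySem.Dict.get?_insert_of_ne _ _ hl]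
    · simp only [pvStepB]
      rw [PySem.Dict.getD_insert_of_ne n0 _ _ hw]

-- with unique keys, the fold stores exactly the listed count at (w, lang)
theorem pv_inner_get (l : List ((String × String) × Int)) (w lang : String) (c : Int)
    (hnd : (l.map (·.1)).Nodup) (hmem : ((w, lang), c) ∈ l)
    (n0 : PySem.Dict String (PySem.Dict String Int))
    (h0 : (n0.getD w PySem.Dict.empty).contains lang = false) :
    ((l.foldl pvStepB n0).getD w PySem.Dict.empty).get? lang = some c := by
  induction l generalizing n0 with
  | nil => cases hmem
  | cons p rest ih =>
    simp only [List.map_cons, List.nodup_cons] at hnd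
    rcases List.mem_cons.mp hmem with rfl | hmem'
    · rw [List.foldl_cons, pv_inner_get_preserved rest w lang (by simpa using hnd.1) _]
      simp only [pvStepB]
      rw [PySem.Dict.getD_insert_self, PySem.Dict.get?_insert_self]
    · rcases p with ⟨⟨w', l'⟩, c'⟩
      have hne : (w, lang) ≠ (w', l') := by
        rintro h; rw [← h] at hnd
        exact hnd.1 (List.mem_map.mpr ⟨_, hmem', rfl⟩)
      rw [List.foldl_cons]
      apply ih hnd.2 hmem'
      by_cases hw : w = w'
      · subst hw
        have hl : lang ≠ l' := fun hl => hne (by rw [hl])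
        simp only [pvStepB]
        rw [PySem.Dict.getD_insert_self, PySem.Dict.contains_insert]
        simp [(by simpa using hl : (lang == l') = false), h0]
      · simp only [pvStepB]
        rw [PySem.Dict.getD_insert_of_ne n0 _ _ hw]
        exact h0

-- overwriting the present inner value (w,lang) ↦ v' commutes with folding pairs that avoid (w,lang)
theorem pv_replant (l : List ((String × String) × Int)) (w lang : String)
    (h : (w, lang) ∉ l.map (·.1)) (n1 : PySem.Dict String (PySem.Dict String Int)) (v' : Int)
    (hin : (n1.getD w PySem.Dict.empty).contains lang = true) :
    l.foldl pvStepB (n1.insert w ((n1.getD w PySem.Dict.empty).insert lang v'))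
      = (l.foldl pvStepB n1).insert w
          (((l.foldl pvStepB n1).getD w PySem.Dict.empty).insert lang v') := by
  induction l generalizing n1 with
  | nil => rfl
  | cons p rest ih =>
    rcases p with ⟨⟨w', l'⟩, c⟩
    simp only [List.map_cons, List.mem_cons, not_or] at h
    have hcw : n1.contains w = true := pv_contains_of_inner _ _ _ hin
    have hstep : pvStepB (n1.insert w ((n1.getD w PySem.Dict.empty).insert lang v')) ((w', l'), c)
        = (pvStepB n1 ((w', l'), c)).insert w
            (((pvStepB n1 ((w', l'), c)).getD w PySem.Dict.empty).insert lang v') := by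
      by_cases hw : w = w'
      · subst hw
        have hl : lang ≠ l' := fun hl => h.1 (by rw [hl])
        simp only [pvStepB]
        rw [PySem.Dict.getD_insert_self, PySem.Dict.getD_insert_self,
          PySem.Dict.insert_insert_self, PySem.Dict.insert_insert_self,
          pv_insert_comm (n1.getD w PySem.Dict.empty) lang l' v' c hl hin]
      · simp only [pvStepB]
        rw [PySem.Dict.getD_insert_of_ne n1 _ _ (Ne.symm hw),
          PySem.Dict.getD_insert_of_ne n1 _ _ hw,
          pv_insert_comm n1 w w' _ _ hw hcw]
    rw [List.foldl_cons, hstep, List.foldl_cons]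
    apply ih h.2
    by_cases hw : w = w'
    · subst hw
      simp only [pvStepB]
      rw [PySem.Dict.getD_insert_self, PySem.Dict.contains_insert]
      simp [hin]
    · simp only [pvStepB]
      rw [PySem.Dict.getD_insert_of_ne n1 _ _ hw]
      exact hin

-- bumping the stored count of a present key, then reshaping, equals reshaping then bumping at the end
theorem pv_present (l : List ((String × String) × Int)) (w lang : String) (c : Int)
    (hnd : (l.map (·.1)).Nodup) (hmem : ((w, lang), c) ∈ l)
    (n0 : PySem.Dict String (PySem.Dict String Int))
    (h0 : (n0.getD w PySem.Dict.empty).contains lang = false) :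
    (l.map (fun p => if p.1 == (w, lang) then ((w, lang), c + 1) else p)).foldl pvStepB n0
      = (l.foldl pvStepB n0).insert w
          (((l.foldl pvStepB n0).getD w PySem.Dict.empty).insert lang (c + 1)) := by
  induction l generalizing n0 with
  | nil => cases hmem
  | cons p rest ih =>
    simp only [List.map_cons, List.nodup_cons] at hnd
    by_cases hp : p.1 = (w, lang)
    · have hpc : p = ((w, lang), c) := by
        rcases List.mem_cons.mp hmem with rfl | hmem'
        · rfl
        · exact absurd (List.mem_map.mpr ⟨_, hmem', hp.symm⟩) hnd.1
      subst hpc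
      have hrest : (w, lang) ∉ rest.map (·.1) := by simpa using hnd.1
      have hmap : rest.map (fun p => if p.1 == (w, lang) then ((w, lang), c + 1) else p) = rest := by
        have hcg := List.map_congr_left (l := rest)
          (f := fun p : (String × String) × Int =>
            if (p.1 == (w, lang)) = true then ((w, lang), c + 1) else p) (g := id)
          (fun x hx => by
            have hx1 : x.1 ≠ (w, lang) := fun hh => hrest (List.mem_map.mpr ⟨x, hx, hh⟩)
            simp [(by simpa using hx1 : (x.1 == (w, lang)) = false)])
        simpa using hcg
      have hhead : (if ((((w, lang), c) : (String × String) × Int).1 == (w, lang)) = true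
          then ((w, lang), c + 1) else ((w, lang), c)) = ((w, lang), c + 1) := by simp
      rw [List.map_cons, hhead, hmap, List.foldl_cons, List.foldl_cons]
      have h1 : pvStepB n0 ((w, lang), c + 1)
          = (pvStepB n0 ((w, lang), c)).insert w
              (((pvStepB n0 ((w, lang), c)).getD w PySem.Dict.empty).insert lang (c + 1)) := by
        simp only [pvStepB]
        rw [PySem.Dict.getD_insert_self, PySem.Dict.insert_insert_self,
          PySem.Dict.insert_insert_self]
      rw [h1, pv_replant rest w lang hrest (pvStepB n0 ((w, lang), c)) (c + 1)
        (by simp only [pvStepB]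
            rw [PySem.Dict.getD_insert_self, PySem.Dict.contains_insert]
            simp)]
    · have hmem' : ((w, lang), c) ∈ rest := by
        rcases List.mem_cons.mp hmem with rfl | hmem'
        · exact absurd rfl hp
        · exact hmem'
      rw [List.map_cons, if_neg (by simp [hp] : ¬ ((p.1 == (w, lang)) = true)),
        List.foldl_cons, List.foldl_cons]
      apply ih hnd.2 hmem'
      rcases p with ⟨⟨w', l'⟩, c'⟩
      by_cases hw : w = w'
      · subst hw
        have hl : lang ≠ l' := fun hl => hp (by simp [hl])
        simp only [pvStepB]
        rw [PySem.Dict.getD_insert_self, PySem.Dict.contains_insert]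
        simp [(by simpa using hl : (lang == l') = false), h0]
      · simp only [pvStepB]
        rw [PySem.Dict.getD_insert_of_ne n0 _ _ hw]
        exact h0

-- the central step: one word processed on A's nested dict = one flat increment then reshape
theorem pv_single_step (flat : PySem.Dict (String × String) Int) (hnd : flat.keys.Nodup)
    (w lang : String) :
    ((flat.insert (w, lang) (flat.getD (w, lang) 0 + 1)).items).foldl pvStepB PySem.Dict.empty
      = pvStepA ((flat.items).foldl pvStepB PySem.Dict.empty) lang w := by
  have hkeys : flat.keys = flat.items.map (·.1) := rfl
  have hF : (((flat.items).foldl pvStepB PySem.Dict.empty).getD w PySem.Dict.empty).contains lang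
      = flat.contains (w, lang) := by
    rw [pv_inner_contains flat.items PySem.Dict.empty w lang,
      PySem.Dict.contains_eq_decide_mem_keys flat (w, lang), hkeys]
    simp
  by_cases hc : flat.contains (w, lang) = true
  · obtain ⟨c, hc'⟩ : ∃ c, flat.get? (w, lang) = some c := by
      have h := PySem.Dict.contains_eq_isSome_get? flat (w, lang)
      rw [hc] at h
      exact Option.isSome_iff_exists.mp h.symm
    have hmem : ((w, lang), c) ∈ flat.items := PySem.Dict.mem_items_of_get?_eq_some flat hc'
    have hgd : flat.getD (w, lang) 0 = c := PySem.Dict.getD_of_get?_eq_some flat 0 hc'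
    rw [hgd, PySem.Dict.items_insert_of_contains flat (c + 1) hc,
      pv_present flat.items w lang c (hkeys ▸ hnd) hmem PySem.Dict.empty (by simp)]
    have hic : (((flat.items).foldl pvStepB PySem.Dict.empty).getD w
        PySem.Dict.empty).contains lang = true := by rw [hF]; exact hc
    have hwc : ((flat.items).foldl pvStepB PySem.Dict.empty).contains w = true :=
      pv_contains_of_inner _ _ _ hic
    have hiv : (((flat.items).foldl pvStepB PySem.Dict.empty).getD w
        PySem.Dict.empty).get? lang = some c :=
      pv_inner_get flat.items w lang c (hkeys ▸ hnd) hmem PySem.Dict.empty (by simp)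
    have hgdc : (((flat.items).foldl pvStepB PySem.Dict.empty).getD w
        PySem.Dict.empty).getD lang 0 = c := by
      rw [PySem.Dict.getD_eq_get?_getD, hiv]; rfl
    simp [pvStepA, hwc, hic, hgdc]
  · have hc' : flat.contains (w, lang) = false := by simpa using hc
    rw [PySem.Dict.getD_of_not_contains flat 0 hc',
      PySem.Dict.items_insert_of_not_contains flat (0 + 1) hc', List.foldl_append]
    have hic : (((flat.items).foldl pvStepB PySem.Dict.empty).getD w
        PySem.Dict.empty).contains lang = false := by rw [hF]; exact hc'
    set N := (flat.items).foldl pvStepB PySem.Dict.empty with hN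
    by_cases hw : N.contains w = true
    · simp [pvStepB, pvStepA, hw, hic, PySem.Dict.getD_insert_self,
        PySem.Dict.insert_insert_self]
    · have hw' : N.contains w = false := by simpa using hw
      simp [pvStepB, pvStepA, hw', hic, PySem.Dict.getD_insert_self,
        PySem.Dict.insert_insert_self, PySem.Dict.getD_of_not_contains N PySem.Dict.empty hw',
        PySem.Dict.getD_empty, PySem.Dict.contains_empty]

-- inner loop over the words of one (lang, words) pair
theorem pv_words_loop (ws : List String) (lang : String)
    (flat : PySem.Dict (String × String) Int) (hnd : flat.keys.Nodup) :
    ws.foldl (fun d w => pvStepA d lang w) ((flat.items).foldl pvStepB PySem.Dict.empty)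
      = ((ws.foldl (fun f w => f.insert (w, lang) (f.getD (w, lang) 0 + 1)) flat).items).foldl
          pvStepB PySem.Dict.empty := by
  induction ws generalizing flat with
  | nil => rfl
  | cons w ws ih =>
    rw [List.foldl_cons, ← pv_single_step flat hnd w lang, List.foldl_cons]
    exact ih _ (PySem.Dict.nodup_keys_insert _ _ _ hnd)

-- outer loop over the zipped (lang, words) pairs
theorem pv_pairs_loop (L : List (String × List String))
    (flat : PySem.Dict (String × String) Int) (hnd : flat.keys.Nodup) :
    L.foldl (fun d p => p.2.foldl (fun d w => pvStepA d p.1 w) d)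
        ((flat.items).foldl pvStepB PySem.Dict.empty)
      = ((L.foldl (fun f p => p.2.foldl (fun f w => f.insert (w, p.1) (f.getD (w, p.1) 0 + 1)) f)
            flat).items).foldl pvStepB PySem.Dict.empty := by
  induction L generalizing flat with
  | nil => rfl
  | cons p L ih =>
    rw [List.foldl_cons, pv_words_loop p.2 p.1 flat hnd, List.foldl_cons]
    exact ih _ (PySem.Dict.nodup_keys_foldl_insert_key p.2 (fun w => (w, p.1)) _ flat hnd)

-- ===== VERDICT (by name: the statement is the Claim_ definition above) =====
theorem accumulate_dict_chunk_py_spec : Claim_equal_accumulate_dict_chunk_py := by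
  unfold Claim_equal_accumulate_dict_chunk_py
  intro payload _
  unfold Spec_accumulate_dict_chunk_py accumulate_dict_chunk_py accumulate_dict_chunk_py_alt
  simp only
  rw [PySem.List.foldl_prod_mk (f := fun d (p : String × List String) =>
        p.2.foldl (fun d w => pvStepA d p.1 w) d)
      (g := fun s (p : String × List String) => PySem.Set.add s p.1)]
  have hempty : (PySem.Dict.empty : PySem.Dict (String × String) Int).items = [] := rfl
  have hdict := pv_pairs_loop (payload.1.zip payload.2) PySem.Dict.empty
    PySem.Dict.nodup_keys_empty
  rw [hempty, List.foldl_nil] at hdict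
  have hset : (payload.1.zip payload.2).foldl (fun s p => PySem.Set.add s p.1) PySem.Set.empty
      = PySem.Set.ofList ((payload.1.zip payload.2).map (·.1)) := by
    rw [show (PySem.Set.empty : PySem.Set String) = [] from rfl,
      ← PySem.Set.update_map_eq_foldl_add, PySem.Set.update_nil_left]
  rw [hdict, hset]
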